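-- pv_equiv track=rewrite | github.com/ShiyuCheng2018/Dealing-With-Data-Assignments | hw2/hw2.py | dups_dict
-- ===== SOURCE A (Python) =====
-- def dups_dict(me_dict):
--     values = []
--     for row in me_dict.values():
--         for each in row:
--             values.append(each)
--     if len(values) == len(list(set(values))):
--         return False
--     else:
--         return True
-- ===== SOURCE B (Python) =====
-- def dups_dict(me_dict):
--     seen = set()
--     for row in me_dict.values():
--         for each in row:
--             if each in seen:
--                 return True
--             seen.add(each)
--     return False
-- ===== Notes on version B (the rewrite author's own statement) =====
-- stated objective: faster
-- what changed: Replaces A's flatten-everything-then-compare-len(set) strategy with a single pass that maintains a growing seen-set and returns True the moment any element repeats (early exit), never building the flat list.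
import Mathlib
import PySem

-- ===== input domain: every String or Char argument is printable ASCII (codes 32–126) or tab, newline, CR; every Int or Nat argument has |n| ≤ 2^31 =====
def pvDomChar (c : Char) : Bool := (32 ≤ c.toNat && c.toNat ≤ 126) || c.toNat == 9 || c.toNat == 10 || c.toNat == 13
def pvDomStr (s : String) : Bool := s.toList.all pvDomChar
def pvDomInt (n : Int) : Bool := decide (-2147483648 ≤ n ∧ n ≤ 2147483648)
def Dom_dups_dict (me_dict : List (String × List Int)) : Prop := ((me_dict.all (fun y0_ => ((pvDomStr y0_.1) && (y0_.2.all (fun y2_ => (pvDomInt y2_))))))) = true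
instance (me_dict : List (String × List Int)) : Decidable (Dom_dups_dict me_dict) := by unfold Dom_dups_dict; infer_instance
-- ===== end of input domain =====

-- B replaces A's flatten-all-then-compare-len(set) with a single pass over the values
-- maintaining a seen-set and returning True at the first repeated element (early exit).

-- ===== PORT A =====
def dups_dict (me_dict : List (String × List Int)) : Bool :=
  let values := me_dict.foldl (fun vs row => row.2.foldl (fun vs each => vs ++ [each]) vs) []
  if values.length = (PySem.Set.ofList values).length then false else true

-- ===== PORT B =====
-- inner 'for each in row' loop: none = duplicate found (early return True), some s = updated seen
def dupsRow (row : List Int) (seen : PySem.Set Int) : Option (PySem.Set Int) :=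
  match row with
  | [] => some seen
  | x :: xs => if seen.contains x then none else dupsRow xs (seen.add x)

-- outer 'for row in me_dict.values()' loop
def dupsRows (rows : List (List Int)) (seen : PySem.Set Int) : Bool :=
  match rows with
  | [] => false
  | r :: rs =>
    match dupsRow r seen with
    | none => true
    | some s => dupsRows rs s

def dups_dict_alt (me_dict : List (String × List Int)) : Bool :=
  dupsRows (me_dict.map (·.2)) PySem.Set.empty

-- ===== PRECONDITION & SPEC =====
def Spec_dups_dict (me_dict : List (String × List Int)) (out : Bool) : Prop := out = dups_dict_alt me_dict
instance (me_dict : List (String × List Int)) (out : Bool) : Decidable (Spec_dups_dict me_dict out) := by unfold Spec_dups_dict; infer_instance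

-- ===== CLAIM (what is proved, stated in full; the proofs are below) =====
def Claim_equal_dups_dict : Prop := ∀ (me_dict : List (String × List Int)), Dom_dups_dict me_dict → Spec_dups_dict me_dict (dups_dict me_dict)

-- ===== LEMMAS AND PROOFS =====

theorem foldl_snoc_eq_append (row acc : List Int) :
    row.foldl (fun vs each => vs ++ [each]) acc = acc ++ row := by
  induction row generalizing acc with
  | nil => simp [List.foldl]
  | cons x xs ih => simp [List.foldl, ih]

theorem foldl_rows_eq_flatten (me_dict : List (String × List Int)) (acc : List Int) :
    me_dict.foldl (fun vs row => row.2.foldl (fun vs each => vs ++ [each]) vs) acc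
      = acc ++ (me_dict.map (·.2)).flatten := by
  induction me_dict generalizing acc with
  | nil => simp [List.foldl]
  | cons p ps ih =>
    rw [List.foldl_cons, foldl_snoc_eq_append, ih]
    simp

theorem foldl_add_length_lt (xs : List Int) (s : PySem.Set Int)
    (h : ¬ xs.Nodup ∨ ∃ x ∈ xs, x ∈ s) :
    (xs.foldl PySem.Set.add s).length < s.length + xs.length := by
  induction xs generalizing s with
  | nil =>
    rcases h with h | ⟨x, hx, _⟩
    · exact absurd List.nodup_nil h
    · cases hx
  | cons x xs ih =>
    have le : ∀ (t : PySem.Set Int) (l : List Int),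
        (l.foldl PySem.Set.add t).length ≤ t.length + l.length := by
      intro t l
      induction l generalizing t with
      | nil => simp
      | cons y ys ihy =>
        simp only [List.foldl]
        have hadd : (PySem.Set.add t y).length ≤ t.length + 1 := by
          unfold PySem.Set.add; split <;> simp
        have := ihy (PySem.Set.add t y)
        simp only [List.length_cons]
        omega
    simp only [List.foldl]
    by_cases hx : s.contains x
    · rw [show PySem.Set.add s x = s from by simp only [PySem.Set.add, hx, if_true]]
      have := le s xs
      simp only [List.length_cons]
      omega
    · have hc : s.contains x = false := by simpa using hx
      rw [show PySem.Set.add s x = s ++ [x] from by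
        simp only [PySem.Set.add, hc, Bool.false_eq_true, if_false]]
      have hxs : x ∉ s := by
        intro hm; exact hx ((PySem.Set.contains_iff s x).mpr hm)
      have h' : ¬ xs.Nodup ∨ ∃ y ∈ xs, y ∈ s ++ [x] := by
        rcases h with h | ⟨y, hy, hys⟩
        · by_cases hxin : x ∈ xs
          · exact Or.inr ⟨x, hxin, by simp⟩
          · left; intro hnd; exact h (List.nodup_cons.mpr ⟨hxin, hnd⟩)
        · rcases List.mem_cons.mp hy with rfl | hy'
          · exact absurd hys hxs
          · exact Or.inr ⟨y, hy', by simp [hys]⟩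
      have := ih (s ++ [x]) h'
      simp only [List.length_append, List.length_cons, List.length_nil] at this ⊢
      omega

theorem ofList_length_eq_iff (xs : List Int) :
    xs.length = (PySem.Set.ofList xs).length ↔ xs.Nodup := by
  constructor
  · intro h
    by_contra hnd
    have := foldl_add_length_lt xs PySem.Set.empty (Or.inl hnd)
    have hof : PySem.Set.ofList xs = xs.foldl PySem.Set.add [] := rfl
    rw [hof] at h
    simp only [PySem.Set.empty] at this
    simp only [List.length_nil] at this
    omega
  · intro h
    rw [PySem.Set.ofList_eq_self_of_nodup xs h]

theorem dupsRow_eq (row : List Int) (seen : PySem.Set Int) (hs : seen.Nodup) :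
    dupsRow row seen = if (seen ++ row : List Int).Nodup then some (seen ++ row) else none := by
  induction row generalizing seen with
  | nil => simp [dupsRow, hs]
  | cons x xs ih =>
    simp only [dupsRow]
    by_cases hx : x ∈ seen
    · have : seen.contains x := (PySem.Set.contains_iff seen x).mpr hx
      rw [this]
      have : ¬ (seen ++ x :: xs : List Int).Nodup := by
        intro hnd
        have := (List.nodup_append.mp hnd).2.2
        exact this x hx x List.mem_cons_self rfl
      simp [this]
    · have hc : seen.contains x = false := by
        by_contra h'
        exact hx ((PySem.Set.contains_iff seen x).mp (by simpa using h'))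
      rw [hc]
      simp only [Bool.false_eq_true, if_false]
      have hadd : PySem.Set.add seen x = seen ++ [x] := by
        simp only [PySem.Set.add, hc, Bool.false_eq_true, if_false]
      have hnd2 : ((seen ++ [x]) : List Int).Nodup := by
        rw [List.nodup_append]
        refine ⟨hs, List.nodup_singleton x, ?_⟩
        intro a ha b hb
        rw [List.mem_singleton] at hb
        subst hb
        intro h
        exact hx (h ▸ ha)
      rw [hadd, ih (seen ++ [x]) hnd2]
      have heq : (seen ++ x :: xs : List Int) = (seen ++ [x]) ++ xs := by simp
      rw [heq]

theorem dupsRows_eq (rows : List (List Int)) (seen : PySem.Set Int) (hs : seen.Nodup) :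
    dupsRows rows seen = !decide ((seen ++ rows.flatten : List Int).Nodup) := by
  induction rows generalizing seen with
  | nil => simp [dupsRows, hs]
  | cons r rs ih =>
    simp only [dupsRows, dupsRow_eq r seen hs]
    by_cases hnd : ((seen ++ r) : List Int).Nodup
    · rw [if_pos hnd]
      show dupsRows rs (seen ++ r) = !decide ((seen ++ (r :: rs).flatten : List Int).Nodup)
      rw [ih (seen ++ r) hnd]
      simp [List.append_assoc]
    · rw [if_neg hnd]
      have hflat : ¬ (seen ++ (r :: rs).flatten : List Int).Nodup := by
        intro h
        apply hnd
        have hsub : List.Sublist (seen ++ r) (seen ++ (r :: rs).flatten) := by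
          simp only [List.flatten_cons, ← List.append_assoc]
          exact List.sublist_append_left _ _
        exact h.sublist hsub
      show true = !decide ((seen ++ (r :: rs).flatten : List Int).Nodup)
      rw [decide_eq_false hflat]
      rfl

-- ===== VERDICT (by name: the statement is the Claim_ definition above) =====
theorem dups_dict_spec : Claim_equal_dups_dict := by
  intro me_dict _
  unfold Spec_dups_dict dups_dict dups_dict_alt
  simp only [foldl_rows_eq_flatten, List.nil_append]
  rw [dupsRows_eq (me_dict.map (·.2)) PySem.Set.empty (by simp [PySem.Set.empty])]
  simp only [PySem.Set.empty, List.nil_append]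
  set flat := (me_dict.map (·.2)).flatten with hflat
  by_cases h : flat.length = (PySem.Set.ofList flat).length
  · have hnd := (ofList_length_eq_iff flat).mp h
    simp [h, hnd]
  · have hnd : ¬ flat.Nodup := fun hn => h ((ofList_length_eq_iff flat).mpr hn)
    simp [h, hnd]
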